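-- pv_equiv track=rewrite | github.com/ES-Alexander/intro-to-monty | Lessons/lesson_formatter.py | hash_border_list
-- ===== SOURCE A (Python) =====
-- BLANK = ' '
--
-- def center_string(string, length, symbol):
--     ''' Returns the given string with even symbols on either side.
--
--     Preferentially has one additional space before the string, for string of odd
--         length.
--
--     space_string(str, int, str) -> str
--
--     '''
--     output = ' ' + string + ' '
--     symbols = length - len(output)
--     if symbols % 2 == 0:
--         symbol_string = gen_symbol_string(symbols // 2, symbol)
--         return symbol_string + output + symbol_string
--     else:
--         before_string = gen_symbol_string((symbols // 2) + 1, symbol)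
--         after_string = gen_symbol_string(symbols // 2, symbol)
--         return before_string + output + after_string
--
-- def hash_border_list(info_list):
--     ''' Returns the formatted list of information in hash-bordered lines.
--
--     Maintains the 80 character width limit.
--
--     topics_line(list[str]) -> str
--
--     '''
--     line = '#'
--     index = 0
--     prev_list_string = ''
--     new_list_string = ''
--     while(len(new_list_string) < 74 and index < len(info_list)):
--         prev_list_string = new_list_string
--         new_list_string += ', ' + info_list[index]
--         if index == 0:
--             new_list_string = new_list_string[2:]
--         index += 1
--     if len(new_list_string) < 76 and index >= len(info_list):
--         # line completely finished
--         return line + center_string(new_list_string, 78, BLANK) + '#'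
--     else:
--         # line overflow -> recursive fix
--         line += center_string(prev_list_string + ',', 78, BLANK) + '#\n'
--         # run again for remainder of the list, until entire list is formatted
--         line += hash_border_list(info_list[(index - 1):])
--         return line
--
-- def gen_symbol_string(num_symbols, symbol):
--     ''' Returns a string of symbols with length 'num_symbols'.
--
--     gen_symbol_string(int) -> str
--
--     '''
--     symbol_string = ''
--     for i in range(num_symbols):
--         symbol_string += symbol
--     return symbol_string
-- ===== SOURCE B (Python) =====
-- BLANK = ' '
--
-- def hash_border_list(info_list):
--     ''' Returns the formatted list of information in hash-bordered lines.
--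
--     Iterative rewrite: per line, a greedy chunk is sized by length
--     arithmetic, its text produced with ', '.join, and centering uses a
--     closed-form padding computation instead of a symbol-building loop.
--     '''
--     n = len(info_list)
--     lines = []
--     i = 0
--     while True:
--         # size the greedy chunk by accumulated length only
--         k = 0
--         total = 0
--         while total < 74 and i + k < n:
--             total += (2 if k > 0 else 0) + len(info_list[i + k])
--             k += 1
--         if total < 76 and i + k >= n:
--             # final line: the whole remainder fits
--             lines.append('#' + _center(', '.join(info_list[i:i + k]), 78) + '#')
--             return '\n'.join(lines)
--         # overflow: emit all but the overflowing item, resume there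
--         lines.append('#' + _center(', '.join(info_list[i:i + k - 1]) + ',', 78) + '#')
--         i += k - 1
--
-- def _center(string, length):
--     out = ' ' + string + ' '
--     pad = length - len(out)
--     return ' ' * ((pad + 1) // 2) + out + ' ' * (pad // 2)
-- ===== Notes on version B (the rewrite author's own statement) =====
-- stated objective: faster
-- what changed: Replaces A's self-recursion (which re-slices the list and re-accumulates strings by repeated concatenation each round) with an iterative outer loop over a cursor that sizes each greedy chunk by length arithmetic alone, renders it with ', '.join, collects finished lines and joins them once, and centers with a closed-form padding computation instead of A's symbol-building loop.
import Mathlib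
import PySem

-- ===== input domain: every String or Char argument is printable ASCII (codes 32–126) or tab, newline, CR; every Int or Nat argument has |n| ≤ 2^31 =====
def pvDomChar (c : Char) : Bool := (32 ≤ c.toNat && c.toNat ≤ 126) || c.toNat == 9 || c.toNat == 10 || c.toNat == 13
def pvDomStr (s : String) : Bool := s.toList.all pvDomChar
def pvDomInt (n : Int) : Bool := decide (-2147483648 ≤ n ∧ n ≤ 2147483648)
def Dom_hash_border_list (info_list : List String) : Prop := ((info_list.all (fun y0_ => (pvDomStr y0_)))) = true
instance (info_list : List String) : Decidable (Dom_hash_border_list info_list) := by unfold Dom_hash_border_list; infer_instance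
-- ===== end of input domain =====

-- B replaces A's recursion by an iterative greedy line builder (length arithmetic + join) with closed-form centering; equivalence is proved on inputs where A terminates.

-- ===== PORT A =====
def gen_symbol_string (num_symbols : Int) (symbol : String) : String :=
  (PySem.List.pyRange 0 num_symbols 1).foldl (fun acc _ => acc ++ symbol) ""

def center_string (string : String) (length : Int) (symbol : String) : String :=
  let output := " " ++ string ++ " "
  let symbols : Int := length - PySem.Str.len output
  if PySem.Int.mod symbols 2 == 0 then
    let symbol_string := gen_symbol_string (PySem.Int.floordiv symbols 2) symbol
    symbol_string ++ output ++ symbol_string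
  else
    let before_string := gen_symbol_string (PySem.Int.floordiv symbols 2 + 1) symbol
    let after_string := gen_symbol_string (PySem.Int.floordiv symbols 2) symbol
    before_string ++ output ++ after_string

-- A's while loop; index starts at 0 and only increases, so it is kept as a Nat
def hashA_loop (info_list : List String) (prev new_ : String) (index : Nat) : String × String × Nat :=
  if h : PySem.Str.len new_ < 74 ∧ index < info_list.length then
    -- new += ', ' + info_list[index]; if index == 0: new = new[2:]
    hashA_loop info_list new_
      (if index == 0
        then PySem.Str.slice (new_ ++ ", " ++ info_list.getD index "") (some 2) none
        else new_ ++ ", " ++ info_list.getD index "") (index + 1)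
  else (prev, new_, index)
termination_by info_list.length - index
decreasing_by omega

-- A's recursion, guarded by fuel: on inputs outside Pre_ the Python recurses forever
-- (RecursionError); info_list.length + 1 fuel is enough wherever the Python returns.
def hashA_go : Nat → List String → String
  | 0, _ => ""
  | fuel+1, info_list =>
    let r := hashA_loop info_list "" "" 0
    if PySem.Str.len r.2.1 < 76 ∧ info_list.length ≤ r.2.2 then
      "#" ++ center_string r.2.1 78 " " ++ "#"
    else
      ("#" ++ center_string (r.1 ++ ",") 78 " " ++ "#\n") ++
        hashA_go fuel (info_list.drop (r.2.2 - 1))   -- info_list[(index-1):], index ≥ 1 here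

def hash_border_list (info_list : List String) : String :=
  hashA_go (info_list.length + 1) info_list

-- ===== PORT B =====
-- ' ' * n  (empty for n ≤ 0)
def b_center (string : String) (length : Int) : String :=
  let out := " " ++ string ++ " "
  let pad := length - PySem.Str.len out
  String.ofList (List.replicate (PySem.Int.floordiv (pad + 1) 2).toNat ' ') ++ out ++
    String.ofList (List.replicate (PySem.Int.floordiv pad 2).toNat ' ')

-- Source B's inner chunk-sizing loop (i, k, total as in the Python; i, k stay ≥ 0)
def bChunk (info_list : List String) (i k : Nat) (total : Int) : Nat × Int :=
  if h : total < 74 ∧ i + k < info_list.length then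
    bChunk info_list i (k + 1)
      (total + (if 0 < k then 2 else 0) + PySem.Str.len (info_list.getD (i + k) ""))
  else (k, total)
termination_by info_list.length - (i + k)
decreasing_by omega

-- Source B's outer while-True loop, fuel-guarded like A (the Python loops forever outside Pre_);
-- info_list[i:i+k] with 0 ≤ i is (drop i).take k
def bGo (fuel : Nat) (info_list : List String) (i : Nat) (lines : List String) : String :=
  match fuel with
  | 0 => PySem.Str.join "\n" lines
  | fuel+1 =>
    let r := bChunk info_list i 0 0
    if r.2 < 76 ∧ info_list.length ≤ i + r.1 then
      PySem.Str.join "\n" (lines ++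
        ["#" ++ b_center (PySem.Str.join ", " ((info_list.drop i).take r.1)) 78 ++ "#"])
    else
      bGo fuel info_list (i + (r.1 - 1)) (lines ++
        ["#" ++ b_center (PySem.Str.join ", " ((info_list.drop i).take (r.1 - 1)) ++ ",") 78 ++ "#"])

def hash_border_list_alt (info_list : List String) : String :=
  bGo (info_list.length + 1) info_list 0 []

-- ===== PRECONDITION & SPEC =====
-- Pre_ excludes exactly the inputs on which A never returns (Python RecursionError from
-- unbounded self-recursion): a non-final item of length ≥ 74, or a final item of length ≥ 76.
def Pre_hash_border_list (info_list : List String) : Prop :=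
  (∀ s ∈ info_list.dropLast, PySem.Str.len s < 74) ∧ (∀ s ∈ info_list, PySem.Str.len s < 76)
instance (info_list : List String) : Decidable (Pre_hash_border_list info_list) := by
  unfold Pre_hash_border_list; infer_instance

def pvWitness_hash_border_list : List String := ["variables", "conditionals", "loops"]

def Spec_hash_border_list (info_list : List String) (out : String) : Prop := out = hash_border_list_alt info_list
instance (info_list : List String) (out : String) : Decidable (Spec_hash_border_list info_list out) := by unfold Spec_hash_border_list; infer_instance

-- ===== CLAIM (what is proved, stated in full; the proofs are below) =====
def Claim_equal_hash_border_list : Prop := ∀ (info_list : List String), Dom_hash_border_list info_list → Pre_hash_border_list info_list → Spec_hash_border_list info_list (hash_border_list info_list)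

-- ===== LEMMAS AND PROOFS =====

-- the string A's inner loop has accumulated after k items, = ', '.join of the first k items
def Jstr (l : List String) (k : Nat) : String := PySem.Str.join ", " (l.take k)

-- the number of items both inner loops take for the current line, as a recursion of A's shape
def chunkK (l : List String) (k : Nat) : Nat :=
  if PySem.Str.len (Jstr l k) < 74 ∧ k < l.length then chunkK l (k + 1) else k
termination_by l.length - k
decreasing_by omega

theorem join_snoc (sep : List Char) (xs : List (List Char)) (y : List Char) (h : xs ≠ []) :
    PySem.Chars.join sep (xs ++ [y]) = PySem.Chars.join sep xs ++ sep ++ y := by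
  induction xs with
  | nil => simp at h
  | cons a t ih =>
    cases t with
    | nil => simp [PySem.Chars.join_cons_cons, PySem.Chars.join_singleton]
    | cons b u =>
      have hih := ih (by simp)
      simp only [List.cons_append, PySem.Chars.join_cons_cons] at hih ⊢
      rw [hih]; simp

theorem Jstr_zero (l : List String) : Jstr l 0 = "" := by
  apply String.toList_inj.mp
  simp [Jstr, PySem.Str.join, PySem.Chars.join_nil]

theorem Jstr_one (l : List String) (h : 0 < l.length) : Jstr l 1 = l.getD 0 "" := by
  cases l with
  | nil => simp at h
  | cons a t =>
    apply String.toList_inj.mp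
    simp [Jstr, PySem.Str.join, PySem.Chars.join_singleton]

theorem Jstr_succ (l : List String) (k : Nat) (hk : 1 ≤ k) (h : k < l.length) :
    Jstr l (k + 1) = Jstr l k ++ ", " ++ l.getD k "" := by
  apply String.toList_inj.mp
  have ht : l.take (k + 1) = l.take k ++ [l.getD k ""] := by
    rw [List.take_add_one]
    congr 1
    simp [List.getD, List.getElem?_eq_getElem h]
  simp only [Jstr, PySem.Str.join, ht, List.map_append, List.map_cons, List.map_nil]
  rw [join_snoc _ _ _ ?hne]
  case hne => simp [List.take_eq_nil_iff]; exact ⟨by omega, by rintro rfl; simp at h⟩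
  simp

theorem str_step (l : List String) (k : Nat) (h : k < l.length) :
    (if k == 0
      then PySem.Str.slice (Jstr l k ++ ", " ++ l.getD k "") (some 2) none
      else Jstr l k ++ ", " ++ l.getD k "") = Jstr l (k + 1) := by
  by_cases h0 : k = 0
  · subst h0
    simp only [beq_self_eq_true, if_true]
    apply String.toList_inj.mp
    rw [Jstr_one l (by omega), Jstr_zero]
    simp only [PySem.Str.toList_slice, PySem.Chars.slice_eq_listSlice, String.toList_append]
    rw [PySem.List.slice_from _ (by norm_num)]
    rfl
  · rw [if_neg (by simpa using h0), Jstr_succ l k (by omega) h]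

theorem len_step (l : List String) (k : Nat) (h : k < l.length) :
    PySem.Str.len (Jstr l (k + 1)) =
      PySem.Str.len (Jstr l k) + (if 0 < k then 2 else 0) + PySem.Str.len (l.getD k "") := by
  by_cases h0 : k = 0
  · subst h0
    rw [Jstr_one l (by omega), Jstr_zero]
    simp
  · rw [Jstr_succ l k (by omega) h, if_pos (by omega)]
    simp
    omega

theorem chunkK_ge (l : List String) (k : Nat) : k ≤ chunkK l k := by
  by_cases hg : PySem.Str.len (Jstr l k) < 74 ∧ k < l.length
  · rw [chunkK.eq_def, if_pos hg]; exact le_trans (by omega) (chunkK_ge l (k + 1))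
  · rw [chunkK.eq_def, if_neg hg]
termination_by l.length - k
decreasing_by omega

theorem chunkK_le (l : List String) (k : Nat) (h : k ≤ l.length) : chunkK l k ≤ l.length := by
  by_cases hg : PySem.Str.len (Jstr l k) < 74 ∧ k < l.length
  · rw [chunkK.eq_def, if_pos hg]; exact chunkK_le l (k + 1) (by omega)
  · rw [chunkK.eq_def, if_neg hg]; exact h
termination_by l.length - k
decreasing_by omega

theorem loopA_eq (l : List String) (k : Nat) (_hk : k ≤ l.length) :
    hashA_loop l (Jstr l (k - 1)) (Jstr l k) k =
      (Jstr l (chunkK l k - 1), Jstr l (chunkK l k), chunkK l k) := by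
  by_cases hg : PySem.Str.len (Jstr l k) < 74 ∧ k < l.length
  · rw [hashA_loop.eq_def, dif_pos hg, chunkK.eq_def, if_pos hg]
    rw [str_step l k hg.2]
    have hcast : Jstr l k = Jstr l (k + 1 - 1) := by norm_num
    rw [hcast]
    exact loopA_eq l (k + 1) hg.2
  · rw [hashA_loop.eq_def, dif_neg hg, chunkK.eq_def, if_neg hg]
termination_by l.length - k
decreasing_by omega

theorem bChunk_eq (info : List String) (i : Nat) (hi : i ≤ info.length) (k : Nat)
    (hk : k ≤ info.length - i) :
    bChunk info i k (PySem.Str.len (Jstr (info.drop i) k)) =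
      (chunkK (info.drop i) k, PySem.Str.len (Jstr (info.drop i) (chunkK (info.drop i) k))) := by
  have hlen : (info.drop i).length = info.length - i := by simp
  by_cases hg : PySem.Str.len (Jstr (info.drop i) k) < 74 ∧ k < (info.drop i).length
  · have hg' : PySem.Str.len (Jstr (info.drop i) k) < 74 ∧ i + k < info.length :=
      ⟨hg.1, by omega⟩
    rw [bChunk.eq_def, dif_pos hg', chunkK.eq_def, if_pos hg]
    have hget : info.getD (i + k) "" = (info.drop i).getD k "" := by
      simp [List.getD, List.getElem?_drop]
    rw [hget, ← len_step (info.drop i) k (by omega)]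
    exact bChunk_eq info i hi (k + 1) (by omega)
  · have hg' : ¬ (PySem.Str.len (Jstr (info.drop i) k) < 74 ∧ i + k < info.length) := by
      intro hc; exact hg ⟨hc.1, by omega⟩
    rw [bChunk.eq_def, dif_neg hg', chunkK.eq_def, if_neg hg]
termination_by info.length - (i + k)
decreasing_by omega

theorem foldl_sp {α : Type} (xs : List α) (acc : String) :
    xs.foldl (fun a _ => a ++ " ") acc = acc ++ String.ofList (List.replicate xs.length ' ') := by
  induction xs generalizing acc with
  | nil => apply String.toList_inj.mp; simp
  | cons x t ih =>
    rw [List.foldl_cons, ih]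
    apply String.toList_inj.mp
    simp [List.replicate_succ]

theorem gen_repl (n : Int) : gen_symbol_string n " " = String.ofList (List.replicate n.toNat ' ') := by
  unfold gen_symbol_string
  rw [PySem.List.pyRange_one, List.foldl_map, foldl_sp]
  apply String.toList_inj.mp
  simp

theorem center_eq (s : String) (len : Int) : center_string s len " " = b_center s len := by
  simp only [center_string, b_center]
  generalize len - PySem.Str.len (" " ++ s ++ " ") = pad
  have hq := PySem.Int.floordiv_mul_add_mod pad 2
  have hr0 := PySem.Int.mod_nonneg pad (by norm_num : (0:Int) < 2)
  have hr1 := PySem.Int.mod_lt pad (by norm_num : (0:Int) < 2)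
  by_cases hm : PySem.Int.mod pad 2 = 0
  · have h2 : PySem.Int.floordiv (pad + 1) 2 = PySem.Int.floordiv pad 2 := by
      rw [PySem.Int.floordiv_eq_iff_of_pos (by norm_num : (0:Int) < 2)]
      omega
    rw [if_pos (by simp only [beq_iff_eq]; exact hm), h2, gen_repl]
  · have h2 : PySem.Int.floordiv (pad + 1) 2 = PySem.Int.floordiv pad 2 + 1 := by
      rw [PySem.Int.floordiv_eq_iff_of_pos (by norm_num : (0:Int) < 2)]
      omega
    rw [if_neg (by simp only [beq_iff_eq]; exact hm), h2, gen_repl, gen_repl]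

theorem join_single (s : String) : PySem.Str.join "\n" [s] = s := by
  apply String.toList_inj.mp
  simp [PySem.Str.join, PySem.Chars.join_singleton]

theorem join_snoc2C (sep : List Char) (M : List (List Char)) (l x : List Char) :
    PySem.Chars.join sep ((M ++ [l]) ++ [x]) = PySem.Chars.join sep (M ++ [l ++ sep ++ x]) := by
  rw [join_snoc sep (M ++ [l]) x (by simp)]
  cases M with
  | nil => simp [PySem.Chars.join_singleton]
  | cons m t =>
    rw [join_snoc sep (m :: t) l (by simp), join_snoc sep (m :: t) (l ++ sep ++ x) (by simp)]
    simp

theorem join_snoc2 (acc : List String) (line X : String) :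
    PySem.Str.join "\n" ((acc ++ [line]) ++ [X]) =
      PySem.Str.join "\n" (acc ++ [line ++ "\n" ++ X]) := by
  apply String.toList_inj.mp
  simp only [PySem.Str.join, String.toList_ofList, List.map_append, List.map_cons, List.map_nil]
  rw [join_snoc2C]
  simp [String.toList_append]

theorem pre_drop (l : List String) (m : Nat) (h : Pre_hash_border_list l) :
    Pre_hash_border_list (l.drop m) := by
  have hd : (l.drop m).dropLast = l.dropLast.drop m := by
    simp only [List.dropLast_eq_take, List.drop_take, List.length_drop]; congr 1; omega
  constructor
  · intro s hs
    rw [hd] at hs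
    exact h.1 s (List.mem_of_mem_drop hs)
  · intro s hs
    exact h.2 s (List.mem_of_mem_drop hs)

theorem getD_mem (l : List String) (h : 0 < l.length) : l.getD 0 "" ∈ l := by
  cases l with
  | nil => simp at h
  | cons a t => simp

theorem chunk_progress (l : List String) (hpre : Pre_hash_border_list l)
    (hov : ¬ (PySem.Str.len (Jstr l (chunkK l 0)) < 76 ∧ l.length ≤ chunkK l 0)) :
    2 ≤ chunkK l 0 := by
  have hlen0 : PySem.Str.len (Jstr l 0) = 0 := by rw [Jstr_zero]; decide
  by_cases hnil : l.length = 0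
  · have h0 : chunkK l 0 = 0 := by
      rw [chunkK.eq_def, if_neg (fun hc => by omega)]
    rw [h0] at hov
    exact absurd ⟨by omega, by omega⟩ hov
  · have h0 : 0 < l.length := by omega
    have hstep : chunkK l 0 = chunkK l 1 := by
      rw [chunkK.eq_def, if_pos ⟨by omega, h0⟩]
    by_contra hlt
    have hge := chunkK_ge l 1
    have hK1 : chunkK l 0 = 1 := by omega
    have hguard : ¬ (PySem.Str.len (Jstr l 1) < 74 ∧ 1 < l.length) := by
      intro hc
      have he : chunkK l 1 = chunkK l 2 := by rw [chunkK.eq_def, if_pos hc]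
      have := chunkK_ge l 2
      omega
    have hJ1 : Jstr l 1 = l.getD 0 "" := Jstr_one l h0
    by_cases hone : l.length = 1
    · apply hov
      refine ⟨?_, by omega⟩
      rw [hK1, hJ1]
      exact hpre.2 _ (getD_mem l h0)
    · have h2 : 1 < l.length := by omega
      have h74 : 74 ≤ PySem.Str.len (Jstr l 1) := by
        by_contra hx
        exact hguard ⟨by omega, h2⟩
      have hmem : l.getD 0 "" ∈ l.dropLast := by
        cases l with
        | nil => simp at h0
        | cons a t =>
          cases t with
          | nil => simp at h2
          | cons b u => simp
      have := hpre.1 _ hmem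
      rw [hJ1] at h74
      omega

theorem outer (fuel : Nat) (info : List String) (i : Nat) (acc : List String)
    (hi : i ≤ info.length) (hpre : Pre_hash_border_list (info.drop i))
    (hfuel : info.length - i < fuel) :
    bGo fuel info i acc = PySem.Str.join "\n" (acc ++ [hashA_go fuel (info.drop i)]) := by
  induction fuel generalizing info i acc with
  | zero => omega
  | succ f ih =>
    have hlen : (info.drop i).length = info.length - i := by simp
    have hA := loopA_eq (info.drop i) 0 (by omega)
    have hB := bChunk_eq info i hi 0 (by omega)
    rw [show (0 - 1 : Nat) = 0 from rfl, Jstr_zero] at hA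
    have hlen0 : PySem.Str.len ("" : String) = 0 := by decide
    rw [Jstr_zero, hlen0] at hB
    simp only [bGo, hashA_go, hA, hB]
    by_cases hc : PySem.Str.len (Jstr (info.drop i) (chunkK (info.drop i) 0)) < 76 ∧
        (info.drop i).length ≤ chunkK (info.drop i) 0
    · rw [if_pos (show _ ∧ info.length ≤ i + chunkK (info.drop i) 0 from ⟨hc.1, by omega⟩),
        if_pos (show _ ∧ (info.drop i).length ≤ chunkK (info.drop i) 0 from hc)]
      rw [show PySem.Str.join ", " ((info.drop i).take (chunkK (info.drop i) 0)) =
        Jstr (info.drop i) (chunkK (info.drop i) 0) from rfl]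
      rw [center_eq]
    · rw [if_neg (show ¬ (_ ∧ info.length ≤ i + chunkK (info.drop i) 0) from
          fun hx => hc ⟨hx.1, by omega⟩),
        if_neg (show ¬ (_ ∧ (info.drop i).length ≤ chunkK (info.drop i) 0) from hc)]
      have hK2 : 2 ≤ chunkK (info.drop i) 0 := chunk_progress (info.drop i) hpre hc
      have hKle : chunkK (info.drop i) 0 ≤ (info.drop i).length := chunkK_le _ 0 (by omega)
      have hdd : (info.drop i).drop (chunkK (info.drop i) 0 - 1) =
          info.drop (i + (chunkK (info.drop i) 0 - 1)) := by
        rw [List.drop_drop]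
      rw [ih info (i + (chunkK (info.drop i) 0 - 1))
        (acc ++ ["#" ++ b_center (PySem.Str.join ", "
          ((info.drop i).take (chunkK (info.drop i) 0 - 1)) ++ ",") 78 ++ "#"]) (by omega)
        (by rw [← hdd]; exact pre_drop _ _ hpre) (by omega)]
      rw [join_snoc2]
      have hx : "#" ++ b_center (PySem.Str.join ", "
            ((info.drop i).take (chunkK (info.drop i) 0 - 1)) ++ ",") 78 ++ "#" ++ "\n" ++
            hashA_go f (info.drop (i + (chunkK (info.drop i) 0 - 1))) =
          ("#" ++ center_string (Jstr (info.drop i) (chunkK (info.drop i) 0 - 1) ++ ",") 78 " " ++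
            "#\n") ++ hashA_go f ((info.drop i).drop (chunkK (info.drop i) 0 - 1)) := by
        rw [hdd, center_eq]
        apply String.toList_inj.mp
        simp [Jstr, String.toList_append,
          (by decide : ("#\n" : String).toList = ['#', '\n']),
          (by decide : ("#" : String).toList = ['#']),
          (by decide : ("\n" : String).toList = ['\n'])]
      rw [hx]

-- ===== VERDICT (by name: the statement is the Claim_ definition above) =====
theorem hash_border_list_spec : Claim_equal_hash_border_list := by
  intro info_list _ hpre
  unfold Spec_hash_border_list hash_border_list hash_border_list_alt
  rw [outer (info_list.length + 1) info_list 0 [] (by omega) (by simpa using hpre) (by omega)]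
  simp [join_single]
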